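-- pv_equiv track=rewrite | github.com/morria/TrainCW | src/traincw/evaluation/metrics.py | _get_edit_operations
-- ===== SOURCE A (Python) =====
-- from typing import Optional
--
-- def _get_edit_operations(
--     s1: str, s2: str
-- ) -> list[tuple[str, Optional[str], Optional[str]]]:
--     """
--     Get the sequence of edit operations to transform s1 into s2.
--
--     Returns list of (operation, s1_char, s2_char) tuples.
--     Operations: "correct", "substitute", "insert", "delete"
--     """
--     len1, len2 = len(s1), len(s2)
--
--     # Build DP table
--     dp = [[0] * (len2 + 1) for _ in range(len1 + 1)]
--     for i in range(len1 + 1):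
--         dp[i][0] = i
--     for j in range(len2 + 1):
--         dp[0][j] = j
--
--     for i in range(1, len1 + 1):
--         for j in range(1, len2 + 1):
--             if s1[i - 1] == s2[j - 1]:
--                 dp[i][j] = dp[i - 1][j - 1]
--             else:
--                 dp[i][j] = 1 + min(dp[i - 1][j], dp[i][j - 1], dp[i - 1][j - 1])
--
--     # Backtrack to get operations
--     operations = []
--     i, j = len1, len2
--
--     while i > 0 or j > 0:
--         if i == 0:
--             # Insert remaining characters from s2
--             operations.append(("insert", None, s2[j - 1]))
--             j -= 1
--         elif j == 0:
--             # Delete remaining characters from s1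
--             operations.append(("delete", s1[i - 1], None))
--             i -= 1
--         elif s1[i - 1] == s2[j - 1]:
--             # Characters match
--             operations.append(("correct", s1[i - 1], s2[j - 1]))
--             i -= 1
--             j -= 1
--         else:
--             # Choose minimum operation
--             delete_cost = dp[i - 1][j]
--             insert_cost = dp[i][j - 1]
--             substitute_cost = dp[i - 1][j - 1]
--
--             if substitute_cost <= delete_cost and substitute_cost <= insert_cost:
--                 # Substitute
--                 operations.append(("substitute", s1[i - 1], s2[j - 1]))
--                 i -= 1
--                 j -= 1
--             elif delete_cost <= insert_cost:
--                 # Delete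
--                 operations.append(("delete", s1[i - 1], None))
--                 i -= 1
--             else:
--                 # Insert
--                 operations.append(("insert", None, s2[j - 1]))
--                 j -= 1
--
--     operations.reverse()
--     return operations
-- ===== SOURCE B (Python) =====
-- from typing import Optional
--
-- def _get_edit_operations(
--     s1: str, s2: str
-- ) -> list[tuple[str, Optional[str], Optional[str]]]:
--     """Forward DP that threads a shared linked chain of operations through each
--     cell (cost, chain); no backtracking phase, only the previous row is kept."""
--     len1, len2 = len(s1), len(s2)
--
--     # Row 0: j inserts; chain is a cons-list (op, parent) with None as nil.
--     prev = []
--     chain = None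
--     for j in range(len2 + 1):
--         prev.append((j, chain))
--         if j < len2:
--             chain = (("insert", None, s2[j]), chain)
--
--     for i in range(1, len1 + 1):
--         c1 = s1[i - 1]
--         cur = [(i, (("delete", c1, None), prev[0][1]))]
--         for j in range(1, len2 + 1):
--             c2 = s2[j - 1]
--             up_cost, up_chain = prev[j]
--             left_cost, left_chain = cur[j - 1]
--             diag_cost, diag_chain = prev[j - 1]
--             if c1 == c2:
--                 cell = (diag_cost, (("correct", c1, c2), diag_chain))
--             elif diag_cost <= up_cost and diag_cost <= left_cost:
--                 cell = (diag_cost + 1, (("substitute", c1, c2), diag_chain))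
--             elif up_cost <= left_cost:
--                 cell = (up_cost + 1, (("delete", c1, None), up_chain))
--             else:
--                 cell = (left_cost + 1, (("insert", None, c2), left_chain))
--             cur.append(cell)
--         prev = cur
--
--     # Unwind the chain (head = last operation) into forward order.
--     out = []
--     node = prev[len2][1]
--     while node is not None:
--         out.append(node[0])
--         node = node[1]
--     out.reverse()
--     return out
-- ===== Notes on version B (the rewrite author's own statement) =====
-- stated objective: alternative
-- what changed: B eliminates A's whole backtracking phase: during the single forward DP pass each cell stores, next to its cost, a shared linked chain of the edit operations leading to it (using the same <=-tie-break as A's backtrack), so the answer is read off the final cell and only the previous row is kept instead of the full table.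
import Mathlib
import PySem

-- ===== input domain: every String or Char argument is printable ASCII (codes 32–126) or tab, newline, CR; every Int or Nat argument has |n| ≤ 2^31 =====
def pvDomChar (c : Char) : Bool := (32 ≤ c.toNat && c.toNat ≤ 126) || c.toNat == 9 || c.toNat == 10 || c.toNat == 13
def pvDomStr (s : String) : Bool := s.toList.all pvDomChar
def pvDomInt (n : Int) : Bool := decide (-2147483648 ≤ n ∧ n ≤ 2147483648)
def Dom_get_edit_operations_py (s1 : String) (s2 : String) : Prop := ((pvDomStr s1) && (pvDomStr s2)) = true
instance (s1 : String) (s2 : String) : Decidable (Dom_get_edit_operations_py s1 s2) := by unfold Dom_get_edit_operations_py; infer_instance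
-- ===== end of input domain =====

-- B replaces A's backtracking phase by threading a shared operation chain through each DP
-- cell during the forward fill (same costs, same tie-breaks); return values proved equal.

-- an edit operation tuple (op, s1_char, s2_char)
abbrev PvOp : Type := String × Option String × Option String

-- ===== PORT A =====

-- fill one DP row: remaining s2 chars, j = index of the cell currently held in `left`
-- (dp[i][j]); produces the row dp[i][j..len2] in order (in-place fill carried as fold state)
def pvFillRowA (prev : List Int) (c1 : Char) : List Char → Nat → Int → List Int
  | [], _, left => [left]
  | c2 :: rest, j, left =>
    let v : Int :=
      if c1 = c2 then prev.getD j 0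
      else 1 + min (min (prev.getD (j + 1) 0) left) (prev.getD j 0)
    left :: pvFillRowA prev c1 rest (j + 1) v

-- build the table row by row (row i depends only on row i-1); i = index of row `prev`
def pvBuildA (s2l : List Char) : List Char → Nat → List Int → List (List Int)
  | [], _, prev => [prev]
  | c1 :: rest, i, prev =>
      prev :: pvBuildA s2l rest (i + 1) (pvFillRowA prev c1 s2l 0 (Int.ofNat (i + 1)))

-- dp[i][j]
def pvGetT (dp : List (List Int)) (i j : Nat) : Int := (dp.getD i []).getD j 0

-- the while-loop backtrack; fuel ≥ i+j (each iteration decreases i+j by ≥ 1)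
def pvBackA (dp : List (List Int)) (s1l s2l : List Char) : Nat → Nat → Nat → List PvOp
  | 0, _, _ => []
  | fuel + 1, i, j =>
    if i = 0 ∧ j = 0 then []
    else if i = 0 then
      ("insert", none, some (String.ofList [s2l.getD (j - 1) ' '])) :: pvBackA dp s1l s2l fuel i (j - 1)
    else if j = 0 then
      ("delete", some (String.ofList [s1l.getD (i - 1) ' ']), none) :: pvBackA dp s1l s2l fuel (i - 1) j
    else if s1l.getD (i - 1) ' ' = s2l.getD (j - 1) ' ' then
      ("correct", some (String.ofList [s1l.getD (i - 1) ' ']), some (String.ofList [s2l.getD (j - 1) ' '])) ::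
        pvBackA dp s1l s2l fuel (i - 1) (j - 1)
    else
      let del := pvGetT dp (i - 1) j
      let ins := pvGetT dp i (j - 1)
      let sub := pvGetT dp (i - 1) (j - 1)
      if sub ≤ del ∧ sub ≤ ins then
        ("substitute", some (String.ofList [s1l.getD (i - 1) ' ']), some (String.ofList [s2l.getD (j - 1) ' '])) ::
          pvBackA dp s1l s2l fuel (i - 1) (j - 1)
      else if del ≤ ins then
        ("delete", some (String.ofList [s1l.getD (i - 1) ' ']), none) :: pvBackA dp s1l s2l fuel (i - 1) j
      else
        ("insert", none, some (String.ofList [s2l.getD (j - 1) ' '])) :: pvBackA dp s1l s2l fuel i (j - 1)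

def get_edit_operations_py (s1 : String) (s2 : String) : List PvOp :=
  let s1l := s1.toList
  let s2l := s2.toList
  let dp := pvBuildA s2l s1l 0 ((List.range (s2l.length + 1)).map Int.ofNat)
  (pvBackA dp s1l s2l (s1l.length + s2l.length) s1l.length s2l.length).reverse

-- ===== PORT B =====

-- a cell: (cost, chain of operations leading here, most recent first; chains are shared)
abbrev PvCell : Type := Int × List PvOp

-- row 0: cell (0,j) costs j with a chain of j inserts
def pvRow0B : List Char → Nat → List PvOp → List PvCell
  | [], j, ch => [(Int.ofNat j, ch)]
  | c :: rest, j, ch =>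
      (Int.ofNat j, ch) :: pvRow0B rest (j + 1) (("insert", none, some (String.ofList [c])) :: ch)

-- fill one row of cells; `left` holds cell (i, j)
def pvFillRowB (prev : List PvCell) (c1 : Char) : List Char → Nat → PvCell → List PvCell
  | [], _, left => [left]
  | c2 :: rest, j, left =>
    let up := prev.getD (j + 1) (0, [])
    let diag := prev.getD j (0, [])
    let cell : PvCell :=
      if c1 = c2 then (diag.1, ("correct", some (String.ofList [c1]), some (String.ofList [c2])) :: diag.2)
      else if diag.1 ≤ up.1 ∧ diag.1 ≤ left.1 then
        (diag.1 + 1, ("substitute", some (String.ofList [c1]), some (String.ofList [c2])) :: diag.2)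
      else if up.1 ≤ left.1 then
        (up.1 + 1, ("delete", some (String.ofList [c1]), none) :: up.2)
      else
        (left.1 + 1, ("insert", none, some (String.ofList [c2])) :: left.2)
    left :: pvFillRowB prev c1 rest (j + 1) cell

-- iterate rows, keeping only the previous one; i = index of row `prev`
def pvBuildB (s2l : List Char) : List Char → Nat → List PvCell → List PvCell
  | [], _, prev => prev
  | c1 :: rest, i, prev =>
      let border : PvCell :=
        (Int.ofNat (i + 1), ("delete", some (String.ofList [c1]), none) :: (prev.getD 0 (0, [])).2)
      pvBuildB s2l rest (i + 1) (pvFillRowB prev c1 s2l 0 border)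

def get_edit_operations_py_alt (s1 : String) (s2 : String) : List PvOp :=
  let s1l := s1.toList
  let s2l := s2.toList
  let last := pvBuildB s2l s1l 0 (pvRow0B s2l 0 [])
  ((last.getD s2l.length (0, [])).2).reverse

-- ===== PRECONDITION & SPEC =====
def Spec_get_edit_operations_py (s1 : String) (s2 : String) (out : List (String × Option String × Option String)) : Prop := out = get_edit_operations_py_alt s1 s2
instance (s1 : String) (s2 : String) (out : List (String × Option String × Option String)) : Decidable (Spec_get_edit_operations_py s1 s2 out) := by unfold Spec_get_edit_operations_py; infer_instance

-- ===== CLAIM (what is proved, stated in full; the proofs are below) =====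
def Claim_equal_get_edit_operations_py : Prop := ∀ (s1 : String) (s2 : String), Dom_get_edit_operations_py s1 s2 → Spec_get_edit_operations_py s1 s2 (get_edit_operations_py s1 s2)

-- ===== LEMMAS AND PROOFS =====

-- mathematical recurrence for the Levenshtein cost table
def pvDpf (s1l s2l : List Char) : Nat → Nat → Int
  | 0, j => Int.ofNat j
  | i + 1, 0 => Int.ofNat (i + 1)
  | i + 1, j + 1 =>
    if s1l.getD i ' ' = s2l.getD j ' ' then pvDpf s1l s2l i j
    else 1 + min (min (pvDpf s1l s2l i (j + 1)) (pvDpf s1l s2l (i + 1) j)) (pvDpf s1l s2l i j)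

-- mathematical backtrack (what A's while-loop computes, op at (i,j) first)
def pvBt (s1l s2l : List Char) : Nat → Nat → List PvOp
  | 0, 0 => []
  | 0, j + 1 => ("insert", none, some (String.ofList [s2l.getD j ' '])) :: pvBt s1l s2l 0 j
  | i + 1, 0 => ("delete", some (String.ofList [s1l.getD i ' ']), none) :: pvBt s1l s2l i 0
  | i + 1, j + 1 =>
    if s1l.getD i ' ' = s2l.getD j ' ' then
      ("correct", some (String.ofList [s1l.getD i ' ']), some (String.ofList [s2l.getD j ' '])) :: pvBt s1l s2l i j
    else if pvDpf s1l s2l i j ≤ pvDpf s1l s2l i (j + 1) ∧ pvDpf s1l s2l i j ≤ pvDpf s1l s2l (i + 1) j then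
      ("substitute", some (String.ofList [s1l.getD i ' ']), some (String.ofList [s2l.getD j ' '])) :: pvBt s1l s2l i j
    else if pvDpf s1l s2l i (j + 1) ≤ pvDpf s1l s2l (i + 1) j then
      ("delete", some (String.ofList [s1l.getD i ' ']), none) :: pvBt s1l s2l i (j + 1)
    else
      ("insert", none, some (String.ofList [s2l.getD j ' '])) :: pvBt s1l s2l (i + 1) j


-- facts following from s.drop j = c :: rest
theorem pvDropFacts (s : List Char) (j : Nat) (c : Char) (rest : List Char)
    (h : s.drop j = c :: rest) :
    s.getD j ' ' = c ∧ s.drop (j + 1) = rest ∧ j < s.length := by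
  have h1 : (s.drop j)[0]? = some c := by rw [h]; rfl
  rw [List.getElem?_drop] at h1
  have hlen := congrArg List.length h
  simp [List.length_drop] at hlen
  refine ⟨?_, ?_, by omega⟩
  · simp only [Nat.add_zero] at h1
    simp [List.getD, h1]
  · have h2 : s.drop (j + 1) = (s.drop j).drop 1 := by rw [List.drop_drop]
    simp [h2, h]

theorem pvFillRowA_getD (s1l s2l : List Char) (i : Nat)
    (prev : List Int) (hprev : ∀ k, k ≤ s2l.length → prev.getD k 0 = pvDpf s1l s2l i k) :
    ∀ (c2s : List Char) (j : Nat), c2s = s2l.drop j →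
      ∀ (left : Int), left = pvDpf s1l s2l (i + 1) j →
      ∀ k, k ≤ c2s.length →
      (pvFillRowA prev (s1l.getD i ' ') c2s j left).getD k 0 = pvDpf s1l s2l (i + 1) (j + k) := by
  intro c2s
  induction c2s with
  | nil =>
    intro j _ left hleft k hk
    have hk0 : k = 0 := by simpa using hk
    subst hk0
    simpa [pvFillRowA] using hleft
  | cons c2 rest ih =>
    intro j hdrop left hleft k hk
    obtain ⟨hc2, hrest, hj⟩ := pvDropFacts s2l j c2 rest hdrop.symm
    match k with
    | 0 => simpa [pvFillRowA] using hleft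
    | k + 1 =>
      have hv : (if s1l.getD i ' ' = c2 then prev.getD j 0
          else 1 + min (min (prev.getD (j + 1) 0) left) (prev.getD j 0))
          = pvDpf s1l s2l (i + 1) (j + 1) := by
        rw [pvDpf, hc2, hprev j (le_of_lt hj), hprev (j + 1) hj, hleft]
      have hind := ih (j + 1) hrest.symm _ hv k (by simpa using hk)
      have harith : j + (k + 1) = (j + 1) + k := by omega
      rw [harith]
      simpa [pvFillRowA] using hind

theorem pvBuildA_getT (s1l s2l : List Char) :
    ∀ (c1s : List Char) (i : Nat), c1s = s1l.drop i →
    ∀ (prev : List Int), (∀ k, k ≤ s2l.length → prev.getD k 0 = pvDpf s1l s2l i k) →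
    ∀ a b, a ≤ c1s.length → b ≤ s2l.length →
      pvGetT (pvBuildA s2l c1s i prev) a b = pvDpf s1l s2l (i + a) b := by
  intro c1s
  induction c1s with
  | nil =>
    intro i _ prev hprev a b ha hb
    have ha0 : a = 0 := by simpa using ha
    subst ha0
    simpa [pvBuildA, pvGetT] using hprev b hb
  | cons c1 rest ih =>
    intro i hdrop prev hprev a b ha hb
    obtain ⟨hc1, hrest, hi⟩ := pvDropFacts s1l i c1 rest hdrop.symm
    match a with
    | 0 => simpa [pvBuildA, pvGetT] using hprev b hb
    | a + 1 =>
      have hrow : ∀ k, k ≤ s2l.length →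
          (pvFillRowA prev c1 s2l 0 (Int.ofNat (i + 1))).getD k 0 = pvDpf s1l s2l (i + 1) k := by
        intro k hk
        have hfr := pvFillRowA_getD s1l s2l i prev hprev s2l 0 (by simp) (Int.ofNat (i + 1))
          (by rw [pvDpf]) k hk
        rw [hc1] at hfr
        simpa using hfr
      have hind := ih (i + 1) hrest.symm _ hrow a b (by simpa using ha) hb
      have harith : i + (a + 1) = (i + 1) + a := by omega
      rw [harith]
      simpa [pvBuildA, pvGetT] using hind

theorem pvBackA_eq_pvBt (s1l s2l : List Char)
    (dp : List (List Int)) (hdp : ∀ a b, a ≤ s1l.length → b ≤ s2l.length → pvGetT dp a b = pvDpf s1l s2l a b) :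
    ∀ (fuel i j : Nat), i + j ≤ fuel → i ≤ s1l.length → j ≤ s2l.length →
      pvBackA dp s1l s2l fuel i j = pvBt s1l s2l i j := by
  intro fuel
  induction fuel with
  | zero =>
    intro i j hf _ _
    have h0 : i = 0 ∧ j = 0 := by omega
    simp [pvBackA, h0.1, h0.2, pvBt]
  | succ fuel ih =>
    intro i j hf hi hj
    match i, j with
    | 0, 0 => simp [pvBackA, pvBt]
    | 0, j + 1 =>
      rw [pvBackA, pvBt]
      rw [if_neg (by simp), if_pos (by simp)]
      simp only [Nat.add_sub_cancel]
      rw [ih 0 j (by omega) (by omega) (by omega)]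
    | i + 1, 0 =>
      rw [pvBackA, pvBt]
      rw [if_neg (by simp), if_neg (by simp), if_pos (by simp)]
      simp only [Nat.add_sub_cancel]
      rw [ih i 0 (by omega) (by omega) (by omega)]
    | i + 1, j + 1 =>
      rw [pvBackA]
      rw [if_neg (by simp), if_neg (by simp), if_neg (by simp)]
      simp only [Nat.add_sub_cancel]
      rw [hdp i (j + 1) (by omega) hj, hdp (i + 1) j hi (by omega), hdp i j (by omega) (by omega)]
      rw [pvBt]
      by_cases hm : s1l.getD i ' ' = s2l.getD j ' '
      · rw [if_pos hm, if_pos hm, ih i j (by omega) (by omega) (by omega)]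
      · rw [if_neg hm, if_neg hm]
        by_cases hs : pvDpf s1l s2l i j ≤ pvDpf s1l s2l i (j + 1) ∧ pvDpf s1l s2l i j ≤ pvDpf s1l s2l (i + 1) j
        · rw [if_pos hs, if_pos hs, ih i j (by omega) (by omega) (by omega)]
        · rw [if_neg hs, if_neg hs]
          by_cases hd : pvDpf s1l s2l i (j + 1) ≤ pvDpf s1l s2l (i + 1) j
          · rw [if_pos hd, if_pos hd, ih i (j + 1) (by omega) (by omega) hj]
          · rw [if_neg hd, if_neg hd, ih (i + 1) j (by omega) hi (by omega)]

theorem pvRow0B_getD (s1l s2l : List Char) :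
    ∀ (c2s : List Char) (j : Nat), c2s = s2l.drop j →
    ∀ (ch : List PvOp), ch = pvBt s1l s2l 0 j →
    ∀ k, k ≤ c2s.length →
      (pvRow0B c2s j ch).getD k (0, []) = (pvDpf s1l s2l 0 (j + k), pvBt s1l s2l 0 (j + k)) := by
  intro c2s
  induction c2s with
  | nil =>
    intro j _ ch hch k hk
    have hk0 : k = 0 := by simpa using hk
    subst hk0
    simp [pvRow0B, pvDpf, hch]
  | cons c rest ih =>
    intro j hdrop ch hch k hk
    obtain ⟨hc, hrest, hj⟩ := pvDropFacts s2l j c rest hdrop.symm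
    match k with
    | 0 => simp [pvRow0B, pvDpf, hch]
    | k + 1 =>
      have hch' : ("insert", (none : Option String), some (String.ofList [c])) :: ch = pvBt s1l s2l 0 (j + 1) := by
        rw [pvBt, hc, hch]
      have hind := ih (j + 1) hrest.symm _ hch' k (by simpa using hk)
      have harith : j + (k + 1) = (j + 1) + k := by omega
      rw [harith]
      simpa [pvRow0B] using hind

theorem pvFillRowB_getD (s1l s2l : List Char) (i : Nat)
    (prev : List PvCell)
    (hprev : ∀ k, k ≤ s2l.length → prev.getD k (0, []) = (pvDpf s1l s2l i k, pvBt s1l s2l i k)) :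
    ∀ (c2s : List Char) (j : Nat), c2s = s2l.drop j →
      ∀ (left : PvCell), left = (pvDpf s1l s2l (i + 1) j, pvBt s1l s2l (i + 1) j) →
      ∀ k, k ≤ c2s.length →
      (pvFillRowB prev (s1l.getD i ' ') c2s j left).getD k (0, []) =
        (pvDpf s1l s2l (i + 1) (j + k), pvBt s1l s2l (i + 1) (j + k)) := by
  intro c2s
  induction c2s with
  | nil =>
    intro j _ left hleft k hk
    have hk0 : k = 0 := by simpa using hk
    subst hk0
    simpa [pvFillRowB] using hleft
  | cons c2 rest ih =>
    intro j hdrop left hleft k hk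
    obtain ⟨hc2, hrest, hj⟩ := pvDropFacts s2l j c2 rest hdrop.symm
    match k with
    | 0 => simpa [pvFillRowB] using hleft
    | k + 1 =>
      have hup := hprev (j + 1) hj
      have hdiag := hprev j (le_of_lt hj)
      have hcell :
          (if s1l.getD i ' ' = c2 then
            ((prev.getD j (0, [])).1, ("correct", some (String.ofList [s1l.getD i ' ']), some (String.ofList [c2])) :: (prev.getD j (0, [])).2)
          else if (prev.getD j (0, [])).1 ≤ (prev.getD (j + 1) (0, [])).1 ∧ (prev.getD j (0, [])).1 ≤ left.1 then
            ((prev.getD j (0, [])).1 + 1, ("substitute", some (String.ofList [s1l.getD i ' ']), some (String.ofList [c2])) :: (prev.getD j (0, [])).2)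
          else if (prev.getD (j + 1) (0, [])).1 ≤ left.1 then
            ((prev.getD (j + 1) (0, [])).1 + 1, ("delete", some (String.ofList [s1l.getD i ' ']), none) :: (prev.getD (j + 1) (0, [])).2)
          else
            (left.1 + 1, ("insert", none, some (String.ofList [c2])) :: left.2))
          = (pvDpf s1l s2l (i + 1) (j + 1), pvBt s1l s2l (i + 1) (j + 1)) := by
        rw [hup, hdiag, hleft, pvDpf, pvBt, hc2]
        by_cases hmatch : s1l.getD i ' ' = c2
        · rw [if_pos hmatch, if_pos hmatch, if_pos hmatch]
        · rw [if_neg hmatch, if_neg hmatch, if_neg hmatch]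
          by_cases hsub : pvDpf s1l s2l i j ≤ pvDpf s1l s2l i (j + 1) ∧ pvDpf s1l s2l i j ≤ pvDpf s1l s2l (i + 1) j
          · rw [if_pos hsub, if_pos hsub]
            obtain ⟨h1, h2⟩ := hsub
            simp only [Prod.mk.injEq]
            exact ⟨by omega, by trivial⟩
          · rw [if_neg hsub, if_neg hsub]
            by_cases hdel : pvDpf s1l s2l i (j + 1) ≤ pvDpf s1l s2l (i + 1) j
            · rw [if_pos hdel, if_pos hdel]
              simp only [Prod.mk.injEq]
              refine ⟨?_, by trivial⟩
              rcases not_and_or.mp hsub with h | h <;> omega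
            · rw [if_neg hdel, if_neg hdel]
              simp only [Prod.mk.injEq]
              refine ⟨?_, by trivial⟩
              rcases not_and_or.mp hsub with h | h <;> omega
      have hind := ih (j + 1) hrest.symm _ hcell k (by simpa using hk)
      have harith : j + (k + 1) = (j + 1) + k := by omega
      rw [harith]
      simpa [pvFillRowB] using hind

theorem pvBuildB_getD (s1l s2l : List Char) :
    ∀ (c1s : List Char) (i : Nat), c1s = s1l.drop i →
    ∀ (prev : List PvCell), (∀ k, k ≤ s2l.length → prev.getD k (0, []) = (pvDpf s1l s2l i k, pvBt s1l s2l i k)) →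
    ∀ k, k ≤ s2l.length →
      (pvBuildB s2l c1s i prev).getD k (0, []) = (pvDpf s1l s2l (i + c1s.length) k, pvBt s1l s2l (i + c1s.length) k) := by
  intro c1s
  induction c1s with
  | nil =>
    intro i _ prev hprev k hk
    simpa [pvBuildB] using hprev k hk
  | cons c1 rest ih =>
    intro i hdrop prev hprev k hk
    obtain ⟨hc1, hrest, hi⟩ := pvDropFacts s1l i c1 rest hdrop.symm
    have hborder : ((Int.ofNat (i + 1) : Int), ("delete", some (String.ofList [c1]), (none : Option String)) :: (prev.getD 0 (0, [])).2)
        = (pvDpf s1l s2l (i + 1) 0, pvBt s1l s2l (i + 1) 0) := by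
      rw [hprev 0 (by omega), pvDpf, pvBt, hc1]
    have hrow : ∀ k, k ≤ s2l.length →
        (pvFillRowB prev c1 s2l 0 ((Int.ofNat (i + 1) : Int), ("delete", some (String.ofList [c1]), (none : Option String)) :: (prev.getD 0 (0, [])).2)).getD k (0, [])
          = (pvDpf s1l s2l (i + 1) k, pvBt s1l s2l (i + 1) k) := by
      intro k hk
      have hfr := pvFillRowB_getD s1l s2l i prev hprev s2l 0 (by simp) _ hborder k hk
      rw [hc1] at hfr
      simpa using hfr
    have hind := ih (i + 1) hrest.symm _ hrow k hk
    have harith : i + (c1 :: rest).length = (i + 1) + rest.length := by simp; omega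
    rw [harith]
    simpa [pvBuildB] using hind

-- A's whole pipeline and B's whole pipeline both compute (pvBt len1 len2).reverse
theorem pvMain (s1l s2l : List Char) :
    (pvBackA (pvBuildA s2l s1l 0 ((List.range (s2l.length + 1)).map Int.ofNat)) s1l s2l
        (s1l.length + s2l.length) s1l.length s2l.length).reverse
      = ((pvBuildB s2l s1l 0 (pvRow0B s2l 0 [])).getD s2l.length ((0 : Int), ([] : List PvOp))).2.reverse := by
  have hrow0 : ∀ k, k ≤ s2l.length →
      ((List.range (s2l.length + 1)).map Int.ofNat).getD k 0 = pvDpf s1l s2l 0 k := by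
    intro k hk
    have hr : (List.range (s2l.length + 1))[k]? = some k := by
      rw [List.getElem?_range (by omega)]
    rw [pvDpf]
    simp [List.getD, hr]
  have hdp := pvBuildA_getT s1l s2l s1l 0 (by simp) _ hrow0
  have hback := pvBackA_eq_pvBt s1l s2l _
    (fun a b ha hb => by simpa using hdp a b ha hb)
    (s1l.length + s2l.length) s1l.length s2l.length le_rfl le_rfl le_rfl
  have hrow0B : ∀ k, k ≤ s2l.length →
      (pvRow0B s2l 0 []).getD k (0, []) = (pvDpf s1l s2l 0 k, pvBt s1l s2l 0 k) := by
    intro k hk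
    have := pvRow0B_getD s1l s2l s2l 0 (by simp) [] (by rw [pvBt]) k hk
    simpa using this
  have hB := pvBuildB_getD s1l s2l s1l 0 (by simp) _ hrow0B s2l.length le_rfl
  rw [hback, hB]
  simp

-- ===== VERDICT (by name: the statement is the Claim_ definition above) =====
theorem get_edit_operations_py_spec : Claim_equal_get_edit_operations_py := by
  intro s1 s2 _
  unfold Spec_get_edit_operations_py get_edit_operations_py get_edit_operations_py_alt
  exact pvMain s1.toList s2.toList
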